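-- pv_equiv track=rewrite | github.com/Santiagolainen/ejercicios-AED | Ficha12E7.py | pal_men
-- ===== SOURCE A (Python) =====
-- def pal_men(texto):
--     palabra = ''
--     i = 0
--     cont_pal_men = 0
--     while texto[i] != '.':
--         if texto[i] != ' ':
--             palabra += texto[i]
--         else:
--             mitad_palabra = len(palabra)//2 + 1
--             if 'men' in palabra[0: mitad_palabra]:
--                 cont_pal_men += 1
--             palabra = ''
--         i += 1
--     mitad_palabra = len(palabra)//2 + 1
--     if 'men' in palabra[0: mitad_palabra]:
--         cont_pal_men += 1
--
--     return cont_pal_men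
-- ===== SOURCE B (Python) =====
-- def pal_men(texto):
--     # locate the terminating period with a minimal scan (IndexError if absent, like A)
--     i = 0
--     while texto[i] != '.':
--         i += 1
--     frase = texto[:i]
--     return sum(1 for w in frase.split(' ') if 'men' in w[:len(w)//2 + 1])
-- ===== Notes on version B (the rewrite author's own statement) =====
-- stated objective: simpler
-- what changed: Replaces A's single interleaved character loop that accumulates words and counts on the fly with a two-phase computation: a minimal scan locates the first period, then the prefix is split on ' ' and matching words are counted with a comprehension.
import Mathlib
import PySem

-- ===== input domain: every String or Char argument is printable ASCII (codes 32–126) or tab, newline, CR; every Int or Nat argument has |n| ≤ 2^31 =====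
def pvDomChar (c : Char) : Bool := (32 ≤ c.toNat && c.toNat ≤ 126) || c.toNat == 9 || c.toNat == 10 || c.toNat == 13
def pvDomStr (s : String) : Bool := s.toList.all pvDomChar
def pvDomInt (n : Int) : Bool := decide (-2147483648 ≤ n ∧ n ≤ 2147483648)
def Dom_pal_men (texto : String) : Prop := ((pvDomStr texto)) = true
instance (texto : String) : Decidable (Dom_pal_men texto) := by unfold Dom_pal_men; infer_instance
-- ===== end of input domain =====

-- B replaces A's interleaved character loop by locate-the-period then split-and-count; equal on inputs containing '.' (A raises otherwise).


-- ===== PORT A =====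
-- 'men' in palabra[0 : len(palabra)//2 + 1]  (shared by both ports: A and B compute this test identically)
def menHalf (pal : List Char) : Bool :=
  PySem.Chars.isIn "men".toList
    (PySem.Chars.slice pal (some 0) (some (PySem.Int.floordiv (pal.length : Int) 2 + 1)))

-- A's while loop: state (palabra, cont); the [] case is Python's IndexError (excluded by Pre_)
def palAGo : List Char → List Char → Int → Int
  | [], _, cont => cont
  | c :: rest, pal, cont =>
    if c = '.' then (if menHalf pal then cont + 1 else cont)
    else if c ≠ ' ' then palAGo rest (pal ++ [c]) cont
    else palAGo rest [] (if menHalf pal then cont + 1 else cont)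

def pal_men (texto : String) : Int := palAGo texto.toList [] 0

-- ===== PORT B =====
-- i = 0; while texto[i] != '.': i += 1   (the [] case is Python's IndexError, excluded by Pre_)
def bLocate : List Char → Nat
  | [] => 0
  | c :: rest => if c = '.' then 0 else bLocate rest + 1

def pal_men_alt (texto : String) : Int :=
  let cs := texto.toList
  let frase := PySem.Chars.slice cs none (some (bLocate cs : Int))
  ((PySem.Chars.splitOn frase [' ']).countP menHalf : Int)

-- ===== PRECONDITION & SPEC =====
-- A raises IndexError when texto contains no '.': the scan runs off the end (B does the same).
def Pre_pal_men (texto : String) : Prop := '.' ∈ texto.toList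
instance (texto : String) : Decidable (Pre_pal_men texto) := by unfold Pre_pal_men; infer_instance
def pvWitness_pal_men : String := "mensaje claro."

def Spec_pal_men (texto : String) (out : Int) : Prop := out = pal_men_alt texto
instance (texto : String) (out : Int) : Decidable (Spec_pal_men texto out) := by unfold Spec_pal_men; infer_instance

-- ===== CLAIM (what is proved, stated in full; the proofs are below) =====
def Claim_equal_pal_men : Prop := ∀ (texto : String), Dom_pal_men texto → Pre_pal_men texto → Spec_pal_men texto (pal_men texto)

-- ===== LEMMAS AND PROOFS =====

-- splitOn.go ignores the accumulator up to a reversed prepend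
theorem splitOn_go_acc (sep : List Char) (fuel : Nat) : ∀ (l cur : List Char) (acc : List (List Char)),
    PySem.Chars.splitOn.go sep fuel l cur acc = acc.reverse ++ PySem.Chars.splitOn.go sep fuel l cur [] := by
  induction fuel with
  | zero => intro l cur acc; simp [PySem.Chars.splitOn.go]
  | succ f ih =>
    intro l cur acc
    cases l with
    | nil => simp [PySem.Chars.splitOn.go]
    | cons c rest =>
      simp only [PySem.Chars.splitOn.go]
      split
      · rw [ih _ _ (cur.reverse :: acc), ih _ _ [cur.reverse]]; simp
      · exact ih _ _ acc

-- a chunk with no separator char is emitted whole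
theorem splitOn_go_noSep (fuel : Nat) : ∀ (l cur : List Char) (acc : List (List Char)), ' ' ∉ l →
    PySem.Chars.splitOn.go [' '] fuel l cur acc = acc.reverse ++ [cur.reverse ++ l] := by
  induction fuel with
  | zero => intro l cur acc _; simp [PySem.Chars.splitOn.go]
  | succ f ih =>
    intro l cur acc h
    cases l with
    | nil => simp [PySem.Chars.splitOn.go]
    | cons c rest =>
      have hc : ¬ c = ' ' := fun e => h (e ▸ List.mem_cons_self)
      simp only [PySem.Chars.splitOn.go]
      rw [if_neg (by simp [List.isPrefixOf, Ne.symm hc])]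
      rw [ih rest (c :: cur) acc (fun m => h (List.mem_cons_of_mem _ m))]
      simp

-- consuming a space-free chunk up to and including the next space
theorem splitOn_go_break (t : List Char) (f : Nat) : ∀ (xs cur : List Char) (acc : List (List Char)), ' ' ∉ xs →
    PySem.Chars.splitOn.go [' '] (xs.length + 1 + f) (xs ++ ' ' :: t) cur acc
      = PySem.Chars.splitOn.go [' '] f t [] ((cur.reverse ++ xs) :: acc) := by
  intro xs
  induction xs with
  | nil =>
    intro cur acc _
    have : ([] : List Char).length + 1 + f = f + 1 := by simp; omega
    rw [this]
    simp only [List.nil_append, PySem.Chars.splitOn.go]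
    rw [if_pos (by simp [List.isPrefixOf])]
    simp
  | cons x xs ih =>
    intro cur acc h
    have hx : ¬ x = ' ' := fun e => h (e ▸ List.mem_cons_self)
    have : (x :: xs).length + 1 + f = (xs.length + 1 + f) + 1 := by simp; omega
    rw [this]
    simp only [List.cons_append, PySem.Chars.splitOn.go]
    rw [if_neg (by simp [List.isPrefixOf, Ne.symm hx])]
    rw [ih (x :: cur) acc (fun m => h (List.mem_cons_of_mem _ m))]
    simp

-- a string with no space splits to a single word (Python ''.split(' ') = [''])
theorem splitOn_noSep (l : List Char) (h : ' ' ∉ l) : PySem.Chars.splitOn l [' '] = [l] := by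
  unfold PySem.Chars.splitOn
  rw [splitOn_go_noSep _ l [] [] h]
  simp

-- peeling the first word off a split
theorem splitOn_break (xs t : List Char) (h : ' ' ∉ xs) :
    PySem.Chars.splitOn (xs ++ ' ' :: t) [' '] = xs :: PySem.Chars.splitOn t [' '] := by
  unfold PySem.Chars.splitOn
  have hl : (xs ++ ' ' :: t).length + 1 = xs.length + 1 + (t.length + 1) := by simp; omega
  rw [hl, splitOn_go_break t (t.length + 1) xs [] [] h]
  rw [splitOn_go_acc]
  simp

-- A's loop, under its invariant, counts B's words
theorem palAGo_eq (cs : List Char) :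
    ∀ (pal : List Char) (cont : Int), '.' ∈ cs → ' ' ∉ pal →
    palAGo cs pal cont
      = cont + ((PySem.Chars.splitOn (pal ++ cs.take (bLocate cs)) [' ']).countP menHalf : Int) := by
  induction cs with
  | nil => intro _ _ h; exact absurd h (by simp)
  | cons c rest ih =>
    intro pal cont hdot hpal
    by_cases hc : c = '.'
    · subst hc
      simp only [palAGo, bLocate, if_true, List.take_zero, List.append_nil]
      rw [splitOn_noSep pal hpal]
      cases hm : menHalf pal <;> simp [List.countP, List.countP.go, hm]
    · have hdrest : '.' ∈ rest := by
        rcases List.mem_cons.mp hdot with h | h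
        · exact absurd h.symm hc
        · exact h
      have hloc : bLocate (c :: rest) = bLocate rest + 1 := by simp [bLocate, hc]
      by_cases hs : c = ' '
      · subst hs
        simp only [palAGo, if_neg hc, ne_eq, not_true_eq_false, if_false]
        rw [ih [] _ hdrest (by simp)]
        rw [hloc, List.take_succ_cons]
        rw [splitOn_break pal _ hpal]
        rw [List.countP_cons]
        cases hm : menHalf pal
        · simp
        · simp; ring
      · simp only [palAGo, if_neg hc, ne_eq, hs, not_false_eq_true, if_true]
        have hpc : ' ' ∉ pal ++ [c] := by
          intro m
          rcases List.mem_append.mp m with m | m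
          · exact hpal m
          · exact hs (List.mem_singleton.mp m).symm
        rw [ih (pal ++ [c]) cont hdrest hpc]
        rw [hloc, List.take_succ_cons]
        simp [List.append_assoc]

-- ===== VERDICT (by name: the statement is the Claim_ definition above) =====
theorem pal_men_spec : Claim_equal_pal_men := by
  intro texto _ hpre
  unfold Spec_pal_men pal_men pal_men_alt
  simp only [PySem.Chars.slice_eq_listSlice, PySem.List.slice_to_natCast]
  simpa using palAGo_eq texto.toList [] 0 hpre (by simp)
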